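-- pv_equiv track=rewrite | github.com/reviewboard/reviewboard | reviewboard/diffviewer/commitutils.py | find_ancestor_commit_ids
-- ===== SOURCE A (Python) =====
-- from collections import deque, namedtuple
--
-- def find_ancestor_commit_ids(commit_id, commit_dag):
--     """Find all ancestor commits of the commit with the given commit ID."""
--     visited = set()
--     unvisited = deque()
--     unvisited.append(commit_id)
--
--     # We can compute all ancestor commits by doing a depth-first traversal
--     # rooted at the given commit id. All visited vertices (except for the
--     # initial vertex) will be ancestors of the commit.
--     while unvisited:
--         vertex = unvisited.popleft()
--
--         if vertex in visited:
--             continue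
--
--         visited.add(vertex)
--
--         for adjacent in commit_dag[vertex]:
--             if adjacent in commit_dag:
--                 unvisited.append(adjacent)
--
--     # A commit is not its own ancestor.
--     visited.remove(commit_id)
--
--     return visited
-- ===== SOURCE B (Python) =====
-- def find_ancestor_commit_ids(commit_id, commit_dag):
--     """Find all ancestor commits of the commit with the given commit ID."""
--     visited = set()
--     frontier = [commit_id]
--
--     # Level-order traversal: mark the whole frontier visited, then build the
--     # next frontier from the unvisited adjacents (deduplicated on insertion).
--     while frontier:
--         visited.update(frontier)
--         next_frontier = []
--
--         for vertex in frontier: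
--             for adjacent in commit_dag[vertex]:
--                 if (adjacent in commit_dag and adjacent not in visited and
--                         adjacent not in next_frontier):
--                     next_frontier.append(adjacent)
--
--         frontier = next_frontier
--
--     # A commit is not its own ancestor.
--     visited.remove(commit_id)
--
--     return visited
-- ===== Notes on version B (the rewrite author's own statement) =====
-- stated objective: alternative
-- what changed: Replaces A's deque-based loop (a FIFO queue that enqueues duplicates and skips already-visited heads) with a level-order traversal that processes a whole frontier at a time and deduplicates the next frontier at insertion, so no vertex ever enters a worklist twice.
-- outside the precondition, e.g. on find_ancestor_commit_ids('x', {'a': ['x']}): A raises KeyError, B raises KeyError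
import Mathlib
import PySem

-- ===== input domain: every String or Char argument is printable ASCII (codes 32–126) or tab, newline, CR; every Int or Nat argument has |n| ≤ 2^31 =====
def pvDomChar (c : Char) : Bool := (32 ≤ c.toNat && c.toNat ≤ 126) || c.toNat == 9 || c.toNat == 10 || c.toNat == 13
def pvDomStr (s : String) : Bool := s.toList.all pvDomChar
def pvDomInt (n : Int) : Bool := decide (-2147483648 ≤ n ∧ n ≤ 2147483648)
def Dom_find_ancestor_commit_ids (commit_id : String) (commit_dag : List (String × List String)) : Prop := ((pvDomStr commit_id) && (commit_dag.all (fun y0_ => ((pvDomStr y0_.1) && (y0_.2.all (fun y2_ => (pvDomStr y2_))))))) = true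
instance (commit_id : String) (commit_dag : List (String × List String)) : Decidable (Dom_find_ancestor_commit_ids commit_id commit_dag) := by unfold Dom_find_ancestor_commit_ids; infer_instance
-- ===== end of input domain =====

-- B re-implements A's deque-with-duplicates BFS as a level-order (frontier) traversal that
-- deduplicates on insertion; equal return value on Pre_ (A mutates nothing observable).

-- ===== PORT A =====
-- helpers for loopA's termination measure (cited in decreasing_by)
def pvKeysLeft (d : PySem.Dict String (List String)) (V : List String) : Nat :=
  (d.keys.filter (fun k => decide (k ∉ V))).length

def pvAdjBound (d : PySem.Dict String (List String)) : Nat :=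
  (d.items.map (fun p => p.2.length)).sum

theorem pvFilterLenLe {α : Type} [DecidableEq α] (l : List α) (p q : α → Bool)
    (h : ∀ x, q x = true → p x = true) :
    (l.filter q).length ≤ (l.filter p).length := by
  have heq : l.filter q = (l.filter p).filter q := by
    rw [List.filter_filter]
    exact (List.filter_congr (fun x _ => by by_cases hq : q x <;> simp_all)).symm
  rw [heq]; exact List.length_filter_le _ _

theorem pvFilterLenLt {α : Type} [DecidableEq α] (l : List α) (p q : α → Bool)
    (h : ∀ x, q x = true → p x = true) (a : α) (ha : a ∈ l) (hpa : p a = true)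
    (hqa : q a = false) :
    (l.filter q).length < (l.filter p).length := by
  have heq : l.filter q = (l.filter p).filter q := by
    rw [List.filter_filter]
    exact (List.filter_congr (fun x _ => by by_cases hq : q x <;> simp_all)).symm
  rw [heq]
  exact List.length_filter_lt_length_iff_exists.mpr
    ⟨a, List.mem_filter.mpr ⟨ha, hpa⟩, by simp [hqa]⟩

theorem pvAdjLenLe (d : PySem.Dict String (List String)) (v : String)
    (hc : d.contains v = true) : (d.getD v []).length ≤ pvAdjBound d := by
  have h1 : (d.get? v).isSome = true := by
    rw [← PySem.Dict.contains_eq_isSome_get? (d := d) (k := v)]; exact hc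
  obtain ⟨l, hl⟩ := Option.isSome_iff_exists.mp h1
  rw [PySem.Dict.getD_of_get?_eq_some d [] hl]
  exact List.le_sum_of_mem (List.mem_map_of_mem (PySem.Dict.mem_items_of_get?_eq_some d hl))

-- A's while-loop: a FIFO queue that may contain duplicates; already-visited heads are skipped.
-- 'commit_dag[vertex]' raises KeyError in Python exactly when vertex is not a key, which can only
-- happen for the start vertex; those inputs are excluded by Pre_. The port uses getD [] there.
def loopA (d : PySem.Dict String (List String)) (visited : PySem.Set String)
    (queue : List String) : List String :=
  match queue with
  | [] => visited
  | v :: rest =>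
    if hv : v ∈ visited then loopA d visited rest
    else loopA d (PySem.Set.add visited v)
      (rest ++ (d.getD v []).filter (fun a => d.contains a))
termination_by (pvAdjBound d + 2) * pvKeysLeft d visited + queue.length
decreasing_by
  · simp only [List.length_cons]; omega
  · rw [PySem.Set.add_of_not_mem hv]
    by_cases hc : d.contains v
    · have hvk : v ∈ d.keys := (PySem.Dict.contains_iff_mem_keys d v).mp hc
      have hlt : pvKeysLeft d (visited ++ [v]) < pvKeysLeft d visited := by
        unfold pvKeysLeft
        refine pvFilterLenLt d.keys _ _ (fun x hx => by
          simp only [decide_eq_true_eq, List.mem_append] at *; tauto) v hvk ?_ ?_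
        · simpa using hv
        · simp
      have hadj : ((d.getD v []).filter (fun a => d.contains a)).length ≤ pvAdjBound d :=
        le_trans (List.length_filter_le _ _) (pvAdjLenLe d v hc)
      have hmul : (pvAdjBound d + 2) * (pvKeysLeft d (visited ++ [v]) + 1)
          ≤ (pvAdjBound d + 2) * pvKeysLeft d visited :=
        Nat.mul_le_mul_left _ hlt
      simp only [List.length_append, List.length_cons, Nat.mul_add, Nat.mul_one] at *
      omega
    · have h0 : d.getD v [] = [] :=
        PySem.Dict.getD_of_not_contains d [] (by simpa using hc)
      have hvk : v ∉ d.keys := fun h => hc ((PySem.Dict.contains_iff_mem_keys d v).mpr h)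
      have heq : pvKeysLeft d (visited ++ [v]) = pvKeysLeft d visited := by
        unfold pvKeysLeft
        congr 1
        refine List.filter_congr (fun x hx => ?_)
        have hxv : x ≠ v := fun e => hvk (e ▸ hx)
        simp [List.mem_append, hxv]
      rw [h0, heq]
      simp only [List.filter_nil, List.append_nil, List.length_cons]
      omega

def find_ancestor_commit_ids (commit_id : String) (commit_dag : List (String × List String)) :
    List String :=
  let d := PySem.Dict.ofList commit_dag
  let visited := loopA d PySem.Set.empty [commit_id]
  -- visited.remove(commit_id): commit_id is always the first element added, so remove = discard
  PySem.Set.discard visited commit_id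

-- ===== PORT B =====
-- one level of Source B's traversal: build next_frontier from the frontier's adjacents,
-- keeping keys that are unvisited and not already collected (acc is the list built so far)
def stepB (d : PySem.Dict String (List String)) (W : PySem.Set String)
    (acc : List String) (frontier : List String) : List String :=
  frontier.foldl (fun acc v =>
    -- 'commit_dag[vertex]': KeyError only reachable for a missing start vertex (outside Pre_);
    -- the port uses getD [] there
    (d.getD v []).foldl (fun acc a =>
      if d.contains a = true ∧ a ∉ W ∧ a ∉ acc then acc ++ [a] else acc) acc) acc

-- facts about stepB cited by loopB's decreasing_by
theorem pvMem_inner (d : PySem.Dict String (List String)) (W : PySem.Set String) :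
    ∀ (l acc : List String) (x : String),
      x ∈ l.foldl (fun acc a =>
        if d.contains a = true ∧ a ∉ W ∧ a ∉ acc then acc ++ [a] else acc) acc →
      x ∈ acc ∨ (d.contains x = true ∧ x ∉ W) := by
  intro l
  induction l with
  | nil => intro acc x hx; exact Or.inl hx
  | cons a tl ih =>
    intro acc x hx
    simp only [List.foldl_cons] at hx
    by_cases h : d.contains a = true ∧ a ∉ W ∧ a ∉ acc
    · rw [if_pos h] at hx
      rcases ih _ x hx with hmem | hgood
      · rcases List.mem_append.mp hmem with h1 | h1
        · exact Or.inl h1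
        · simp only [List.mem_singleton] at h1
          subst h1; exact Or.inr ⟨h.1, h.2.1⟩
      · exact Or.inr hgood
    · rw [if_neg h] at hx
      exact ih _ x hx

theorem pvNodup_inner (d : PySem.Dict String (List String)) (W : PySem.Set String) :
    ∀ (l acc : List String), acc.Nodup →
      (l.foldl (fun acc a =>
        if d.contains a = true ∧ a ∉ W ∧ a ∉ acc then acc ++ [a] else acc) acc).Nodup := by
  intro l
  induction l with
  | nil => intro acc h; exact h
  | cons a tl ih =>
    intro acc h
    simp only [List.foldl_cons]
    by_cases hcond : d.contains a = true ∧ a ∉ W ∧ a ∉ acc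
    · rw [if_pos hcond]
      refine ih _ ?_
      rw [List.nodup_append]
      refine ⟨h, List.nodup_singleton a, ?_⟩
      intro a1 h1 b hb
      rw [List.mem_singleton] at hb
      subst hb
      exact fun he => hcond.2.2 (he ▸ h1)
    · rw [if_neg hcond]; exact ih _ h

theorem pvMem_stepB (d : PySem.Dict String (List String)) (W : PySem.Set String) :
    ∀ (f acc : List String) (x : String), x ∈ stepB d W acc f →
      x ∈ acc ∨ (d.contains x = true ∧ x ∉ W) := by
  intro f
  induction f with
  | nil => intro acc x hx; exact Or.inl hx
  | cons v tl ih =>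
    intro acc x hx
    simp only [stepB, List.foldl_cons] at hx ⊢
    rcases ih _ x hx with hmem | hgood
    · exact pvMem_inner d W _ _ x hmem
    · exact Or.inr hgood

theorem pvNodup_stepB (d : PySem.Dict String (List String)) (W : PySem.Set String) :
    ∀ (f acc : List String), acc.Nodup → (stepB d W acc f).Nodup := by
  intro f
  induction f with
  | nil => intro acc h; exact h
  | cons v tl ih =>
    intro acc h
    simp only [stepB, List.foldl_cons] at ih ⊢
    exact ih _ (pvNodup_inner d W _ _ h)

theorem pvNodupSubsetLen {α : Type} [DecidableEq α] (l l' : List α) (h : l.Nodup)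
    (hs : l ⊆ l') : l.length ≤ l'.length := by
  calc l.length = l.toFinset.card := (List.toFinset_card_of_nodup h).symm
    _ ≤ l'.toFinset.card := Finset.card_le_card (fun x hx => by
          simp only [List.mem_toFinset] at *; exact hs hx)
    _ ≤ l'.length := l'.toFinset_card_le

-- Source B's while-loop: mark the whole frontier visited, build the next frontier, recurse
def loopB (d : PySem.Dict String (List String)) (visited : PySem.Set String)
    (frontier : List String) : List String :=
  if hf : frontier = [] then visited
  else
    let W := PySem.Set.update visited frontier
    loopB d W (stepB d W [] frontier)
termination_by
  (d.keys.filter (fun k => decide (k ∉ visited ∧ k ∉ frontier))).length ^ 2 + frontier.length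
decreasing_by
  set W := PySem.Set.update visited frontier
  set nxt := stepB d W [] frontier
  have hflen : 0 < frontier.length := List.length_pos_of_ne_nil hf
  have hWmem : ∀ x, x ∈ W ↔ x ∈ visited ∨ x ∈ frontier := fun x => PySem.Set.mem_update _ _ _
  have hnm : ∀ x ∈ nxt, d.contains x = true ∧ x ∉ W := by
    intro x hx
    rcases pvMem_stepB d W frontier [] x hx with h | h
    · simp at h
    · exact h
  set s := (d.keys.filter (fun k => decide (k ∉ visited ∧ k ∉ frontier))).length
  set s' := (d.keys.filter (fun k => decide (k ∉ W ∧ k ∉ nxt))).length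
  have himp : ∀ x, (decide (x ∉ W ∧ x ∉ nxt)) = true →
      (decide (x ∉ visited ∧ x ∉ frontier)) = true := by
    intro x hx
    simp only [decide_eq_true_eq] at hx ⊢
    exact ⟨fun h => hx.1 ((hWmem x).mpr (Or.inl h)), fun h => hx.1 ((hWmem x).mpr (Or.inr h))⟩
  have hle : s' ≤ s := pvFilterLenLe d.keys _ _ himp
  have hnsub : nxt ⊆ d.keys.filter (fun k => decide (k ∉ visited ∧ k ∉ frontier)) := by
    intro x hx
    obtain ⟨hc, hw⟩ := hnm x hx
    refine List.mem_filter.mpr ⟨(PySem.Dict.contains_iff_mem_keys d x).mp hc, ?_⟩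
    simp only [decide_eq_true_eq]
    exact ⟨fun h => hw ((hWmem x).mpr (Or.inl h)), fun h => hw ((hWmem x).mpr (Or.inr h))⟩
  have hnlen : nxt.length ≤ s :=
    pvNodupSubsetLen _ _ (pvNodup_stepB d W frontier [] (by simp)) hnsub
  by_cases hne : nxt = []
  · rw [hne]
    have hp : s' ^ 2 ≤ s ^ 2 := Nat.pow_le_pow_left hle 2
    simp only [List.length_nil]
    omega
  · obtain ⟨y, hy⟩ := List.exists_mem_of_ne_nil nxt hne
    obtain ⟨hc, hw⟩ := hnm y hy
    have hlt : s' < s := by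
      refine pvFilterLenLt d.keys _ _ himp y ((PySem.Dict.contains_iff_mem_keys d y).mp hc) ?_ ?_
      · simp only [decide_eq_true_eq]
        exact ⟨fun h => hw ((hWmem y).mpr (Or.inl h)), fun h => hw ((hWmem y).mpr (Or.inr h))⟩
      · simp [hy]
    have h1 : s' + 1 ≤ s := hlt
    have h2 : (s' + 1) * (s' + 1) ≤ s * s := Nat.mul_le_mul h1 h1
    have h4 : s' * s' + s ≤ s * s := by nlinarith
    simp only [pow_two]
    omega

def find_ancestor_commit_ids_alt (commit_id : String) (commit_dag : List (String × List String)) :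
    List String :=
  let d := PySem.Dict.ofList commit_dag
  let visited := loopB d PySem.Set.empty [commit_id]
  -- visited.remove(commit_id): commit_id is always added by the first level, so remove = discard
  PySem.Set.discard visited commit_id

-- ===== PRECONDITION & SPEC =====
-- Pre_ excludes exactly the inputs where Python A raises KeyError: a start commit_id that is
-- not a key of commit_dag (B raises the same KeyError there).
def Pre_find_ancestor_commit_ids (commit_id : String) (commit_dag : List (String × List String)) : Prop :=
  commit_id ∈ commit_dag.map Prod.fst
instance (commit_id : String) (commit_dag : List (String × List String)) : Decidable (Pre_find_ancestor_commit_ids commit_id commit_dag) := by unfold Pre_find_ancestor_commit_ids; infer_instance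

def pvWitness_find_ancestor_commit_ids : String × (List (String × List String)) :=
  ("a", [("a", ["b"]), ("b", [])])

def Spec_find_ancestor_commit_ids (commit_id : String) (commit_dag : List (String × List String)) (out : List String) : Prop := out = find_ancestor_commit_ids_alt commit_id commit_dag
instance (commit_id : String) (commit_dag : List (String × List String)) (out : List String) : Decidable (Spec_find_ancestor_commit_ids commit_id commit_dag out) := by unfold Spec_find_ancestor_commit_ids; infer_instance

-- ===== CLAIM (what is proved, stated in full; the proofs are below) =====
def Claim_equal_find_ancestor_commit_ids : Prop := ∀ (commit_id : String) (commit_dag : List (String × List String)), Dom_find_ancestor_commit_ids commit_id commit_dag → Pre_find_ancestor_commit_ids commit_id commit_dag → Spec_find_ancestor_commit_ids commit_id commit_dag (find_ancestor_commit_ids commit_id commit_dag)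

-- ===== LEMMAS AND PROOFS =====
theorem loopB_cons (d : PySem.Dict String (List String)) (V : PySem.Set String)
    (f : List String) (hf : f ≠ []) :
    loopB d V f = loopB d (PySem.Set.update V f) (stepB d (PySem.Set.update V f) [] f) := by
  rw [loopB, dif_neg hf]

-- pvCanon V l: l with elements of V and later duplicates removed — A's queue, canonicalised.
def pvCanon (V : List String) : List String → List String
  | [] => []
  | x :: xs => if x ∈ V then pvCanon V xs else x :: pvCanon (V ++ [x]) xs

theorem pvCanon_append (l₁ : List String) : ∀ (V l₂ : List String),
    pvCanon V (l₁ ++ l₂) = pvCanon V l₁ ++ pvCanon (V ++ pvCanon V l₁) l₂ := by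
  induction l₁ with
  | nil => intro V l₂; simp [pvCanon]
  | cons x xs ih =>
    intro V l₂
    by_cases hx : x ∈ V
    · simp only [List.cons_append, pvCanon, if_pos hx]
      exact ih V l₂
    · simp only [List.cons_append, pvCanon, if_neg hx]
      rw [ih (V ++ [x]) l₂]
      simp [List.append_assoc]

theorem pvCanon_not_mem : ∀ (l V : List String) (x : String), x ∈ pvCanon V l → x ∉ V := by
  intro l
  induction l with
  | nil => intro V x hx; simp [pvCanon] at hx
  | cons a tl ih =>
    intro V x hx
    by_cases ha : a ∈ V
    · rw [pvCanon, if_pos ha] at hx; exact ih V x hx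
    · rw [pvCanon, if_neg ha] at hx
      rcases List.mem_cons.mp hx with h | h
      · subst h; exact ha
      · intro hV; exact ih (V ++ [a]) x h (List.mem_append.mpr (Or.inl hV))

theorem pvCanon_nodup : ∀ (l V : List String), (pvCanon V l).Nodup := by
  intro l
  induction l with
  | nil => intro V; simp [pvCanon]
  | cons a tl ih =>
    intro V
    by_cases ha : a ∈ V
    · rw [pvCanon, if_pos ha]; exact ih V
    · rw [pvCanon, if_neg ha]
      refine List.nodup_cons.mpr ⟨?_, ih (V ++ [a])⟩
      intro hmem
      exact pvCanon_not_mem tl (V ++ [a]) a hmem (by simp)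

-- the inner for-loop of Source B appends exactly the canonical new elements
theorem pvInner_eq_canon (d : PySem.Dict String (List String)) (W : List String) :
    ∀ (l acc : List String),
      l.foldl (fun acc a =>
        if d.contains a = true ∧ a ∉ W ∧ a ∉ acc then acc ++ [a] else acc) acc
      = acc ++ pvCanon (W ++ acc) (l.filter (fun a => d.contains a)) := by
  intro l
  induction l with
  | nil => intro acc; simp [pvCanon]
  | cons a tl ih =>
    intro acc
    simp only [List.foldl_cons]
    by_cases hc : d.contains a = true
    · by_cases hm : a ∈ W ∨ a ∈ acc
      · have hcond : ¬ (d.contains a = true ∧ a ∉ W ∧ a ∉ acc) := by tauto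
        rw [if_neg hcond, ih acc]
        have : pvCanon (W ++ acc) ((a :: tl).filter (fun a => d.contains a))
            = pvCanon (W ++ acc) (tl.filter (fun a => d.contains a)) := by
          rw [List.filter_cons_of_pos hc, pvCanon, if_pos (List.mem_append.mpr hm)]
        rw [this]
      · rw [not_or] at hm
        have hcond : d.contains a = true ∧ a ∉ W ∧ a ∉ acc := ⟨hc, hm.1, hm.2⟩
        rw [if_pos hcond, ih (acc ++ [a])]
        rw [List.filter_cons_of_pos hc, pvCanon,
          if_neg (by simp only [List.mem_append]; tauto)]
        simp [List.append_assoc]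
    · rw [if_neg (by tauto), ih acc, List.filter_cons_of_neg (by simpa using hc)]

-- main bisimulation: A's loop from (V, Q) equals B's loop resumed mid-level, where the
-- still-unprocessed part of the frontier is r and the next frontier built so far is acc,
-- provided canonicalising A's queue gives r ++ acc.
theorem pvMain (d : PySem.Dict String (List String)) (V : PySem.Set String) (Q : List String) :
    ∀ (r acc : List String), pvCanon V Q = r ++ acc →
      loopA d V Q = loopB d (V ++ r) (stepB d (V ++ r) acc r) := by
  induction V, Q using loopA.induct d with
  | case1 V =>
    intro r acc h
    simp only [pvCanon] at h
    obtain ⟨hr, hacc⟩ := List.append_eq_nil_iff.mp h.symm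
    subst hr; subst hacc
    rw [loopA, loopB]
    simp [stepB]
  | case2 V v rest hv ih =>
    intro r acc h
    rw [pvCanon, if_pos hv] at h
    rw [loopA, dif_pos hv]
    exact ih r acc h
  | case3 V v rest hv ih =>
    intro r acc h
    rw [pvCanon, if_neg hv] at h
    rw [loopA, dif_neg hv]
    rw [PySem.Set.add_of_not_mem hv] at ih ⊢
    -- shared step: consume v as the head of the remaining frontier
    have key : ∀ (r' acc0 : List String), pvCanon (V ++ [v]) rest = r' ++ acc0 →
        loopA d (V ++ [v]) (rest ++ (d.getD v []).filter (fun a => d.contains a))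
          = loopB d (V ++ v :: r') (stepB d (V ++ v :: r') acc0 (v :: r')) := by
      intro r' acc0 hM
      have hstep : stepB d (V ++ v :: r') acc0 (v :: r')
          = stepB d (V ++ v :: r')
              (acc0 ++ pvCanon ((V ++ v :: r') ++ acc0)
                ((d.getD v []).filter (fun a => d.contains a))) r' := by
        simp only [stepB, List.foldl_cons]
        rw [pvInner_eq_canon d (V ++ v :: r') (d.getD v []) acc0]
      rw [hstep]
      have hih := ih r' (acc0 ++ pvCanon ((V ++ v :: r') ++ acc0)
        ((d.getD v []).filter (fun a => d.contains a)))
      have harg : pvCanon (V ++ [v])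
          (rest ++ (d.getD v []).filter (fun a => d.contains a))
          = r' ++ (acc0 ++ pvCanon ((V ++ v :: r') ++ acc0)
              ((d.getD v []).filter (fun a => d.contains a))) := by
        rw [pvCanon_append, hM]
        simp [List.append_assoc]
      have := hih harg
      simpa [List.append_assoc] using this
    rcases r with _ | ⟨r0, r'⟩
    · -- r = []: the level is exhausted; B moves to its next level, which starts with v
      simp only [List.nil_append] at h
      have hacc : acc = v :: pvCanon (V ++ [v]) rest := h.symm
      subst hacc
      set M := pvCanon (V ++ [v]) rest with hM
      have hC : v :: M = pvCanon V (v :: rest) := by rw [pvCanon, if_neg hv]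
      have hnd : (v :: M).Nodup := by rw [hC]; exact pvCanon_nodup _ _
      have hdisj : ∀ x ∈ v :: M, x ∉ V := by
        intro x hx; rw [hC] at hx; exact pvCanon_not_mem _ _ _ hx
      have hupd : PySem.Set.update V (v :: M) = V ++ v :: M :=
        PySem.Set.update_eq_append_of_disjoint V (v :: M) hnd hdisj
      have hstep0 : stepB d (V ++ ([] : List String)) (v :: M) [] = v :: M := rfl
      rw [hstep0, List.append_nil,
        loopB_cons d V (v :: M) (List.cons_ne_nil v M), hupd]
      exact key M [] (by simp)
    · -- r = r0 :: r' with r0 = v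
      have hv0 : r0 = v := by
        have := h; simp only [List.cons_append, List.cons.injEq] at this; exact this.1.symm
      subst hv0
      refine key r' acc ?_
      have := h; simp only [List.cons_append, List.cons.injEq] at this; exact this.2

-- ===== VERDICT (by name: the statement is the Claim_ definition above) =====
theorem find_ancestor_commit_ids_spec : Claim_equal_find_ancestor_commit_ids := by
  intro c dag _hdom _hpre
  have h1 : pvCanon ([] : List String) [c] = [c] ++ [] := by simp [pvCanon]
  have h2 := pvMain (PySem.Dict.ofList dag) [] [c] [c] [] h1
  have h3 : loopB (PySem.Dict.ofList dag) ([] : List String) [c]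
      = loopB (PySem.Dict.ofList dag) ([] ++ [c])
          (stepB (PySem.Dict.ofList dag) ([] ++ [c]) [] [c]) := by
    have hu : PySem.Set.update ([] : PySem.Set String) [c] = [] ++ [c] :=
      PySem.Set.update_eq_append_of_disjoint _ _ (by simp) (by simp)
    rw [loopB_cons _ _ _ (by simp), hu]
  have hmain : loopA (PySem.Dict.ofList dag) ([] : List String) [c]
      = loopB (PySem.Dict.ofList dag) ([] : List String) [c] := h2.trans h3.symm
  show PySem.Set.discard (loopA (PySem.Dict.ofList dag) PySem.Set.empty [c]) c
      = PySem.Set.discard (loopB (PySem.Dict.ofList dag) PySem.Set.empty [c]) c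
  rw [show (PySem.Set.empty : PySem.Set String) = ([] : List String) from rfl, hmain]
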